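-- pv_equiv track=rewrite | github.com/afaqmvirk/carleton-leetcode-games-workshop | solutions/_2housdivided.py | house_divided
-- ===== SOURCE A (Python) =====
-- from collections import Counter
--
-- def house_divided(s, t):
--     # Helper function to generate all mutations of `s` with exactly one nucleotide difference
--     def generate_mutations(s):
--         mutations = set()
--         nucleotides = {'A', 'T', 'C', 'G'}
--         for i in range(len(s)):
--             for nucleotide in nucleotides - {s[i]}:
--                 mutation = s[:i] + nucleotide + s[i+1:]
--                 mutations.add(mutation)
--         return mutations
--
--     # Generate all mutations of `s`
--     mutations = generate_mutations(s)
--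
--     # Collect subsequences of `t` of the same length as `s`
--     subsequences = [t[i:i+len(s)] for i in range(len(t) - len(s) + 1)]
--
--     # Count occurrences of all subsequences in `t`
--     subseq_counts = Counter(subsequences)
--
--     # Filter mutations that appear more than once in `t`
--     valid_mutations = [mut for mut in mutations if subseq_counts[mut] > 1]
--
--     # Output the results
--     valid_mutations.sort()
--     return len(valid_mutations), valid_mutations
-- ===== SOURCE B (Python) =====
-- from collections import Counter
--
-- def house_divided(s, t):
--     # Count each length-|s| window of t, then keep only the distinct windows
--     # that occur more than once and are exactly one nucleotide-substitution
--     # away from s; no mutation set is ever generated.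
--     L = len(s)
--     counts = Counter([t[i:i+L] for i in range(len(t) - L + 1)])
--     valid = []
--     for sub, c in counts.items():
--         if c > 1 and _one_mutation(s, sub):
--             valid.append(sub)
--     valid.sort()
--     return len(valid), valid
--
-- def _one_mutation(s, sub):
--     diffs = [j for j in range(len(s)) if s[j] != sub[j]]
--     return len(diffs) == 1 and sub[diffs[0]] in {'A', 'T', 'C', 'G'}
-- ===== Notes on version B (the rewrite author's own statement) =====
-- stated objective: faster
-- what changed: B never generates the set of one-nucleotide mutations of s: it counts the length-|s| windows of t once and keeps the distinct windows with count > 1 that pass a direct one-substitution-to-a-nucleotide check against s, instead of A's generate-all-3L-mutation-strings-then-look-each-up direction.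
import Mathlib
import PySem

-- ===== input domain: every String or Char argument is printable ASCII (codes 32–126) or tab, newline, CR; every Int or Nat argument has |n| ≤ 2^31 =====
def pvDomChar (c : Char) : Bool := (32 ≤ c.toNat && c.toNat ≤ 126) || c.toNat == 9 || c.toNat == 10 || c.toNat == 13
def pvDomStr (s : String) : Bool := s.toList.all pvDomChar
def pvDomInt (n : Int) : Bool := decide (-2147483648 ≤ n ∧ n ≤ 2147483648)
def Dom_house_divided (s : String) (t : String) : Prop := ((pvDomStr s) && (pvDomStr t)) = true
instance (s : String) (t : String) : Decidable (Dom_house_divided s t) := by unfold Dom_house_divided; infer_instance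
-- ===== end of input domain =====

-- B inverts A's direction: instead of generating all one-nucleotide mutations of s and looking
-- them up in the window counter, B scans the distinct windows of t once and keeps those with
-- count > 1 that are exactly one nucleotide substitution away from s, avoiding A's O(L^2) mutation-set construction (objective: faster).

-- ===== PORT A =====
-- Python set-iteration order is not modelled; here every iterated set is consumed into another
-- set / a counter lookup / a finally sorted list, so the result does not depend on that order.
def house_divided (s : String) (t : String) : Int × List String :=
  let sl := s.toList
  let tl := t.toList
  -- generate_mutations(s)
  let mutations : PySem.Set String :=
    (PySem.List.pyRange 0 (sl.length : Int) 1).foldl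
      (fun muts i =>
        (PySem.Set.diff (PySem.Set.ofList (['A','T','C','G'] : List Char))
            [PySem.List.pyGetD sl i ' ']).foldl
          (fun muts c =>
            PySem.Set.add muts
              (String.ofList (PySem.List.slice sl none (some i) ++ [c] ++
                              PySem.List.slice sl (some (i + 1)) none)))
          muts)
      PySem.Set.empty
  let subsequences : List String :=
    (PySem.List.pyRange 0 ((tl.length : Int) - (sl.length : Int) + 1) 1).map
      (fun i => String.ofList (PySem.List.slice tl (some i) (some (i + (sl.length : Int)))))
  let counts := PySem.Dict.counter subsequences
  let valid := mutations.foldl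
      (fun acc mu => if counts.getD mu 0 > 1 then acc ++ [mu] else acc) ([] : List String)
  let sortedValid := PySem.List.sorted valid (fun x => x) false
  ((sortedValid.length : Int), sortedValid)

-- ===== PORT B =====
def oneMutation (s sub : String) : Bool :=
  let diffs := (PySem.List.pyRange 0 (s.toList.length : Int) 1).filter
      (fun j => PySem.List.pyGetD s.toList j ' ' != PySem.List.pyGetD sub.toList j ' ')
  diffs.length == 1 &&
    PySem.Set.contains (PySem.Set.ofList (['A','T','C','G'] : List Char))
      (PySem.List.pyGetD sub.toList (PySem.List.pyGetD diffs 0 0) ' ')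

def house_divided_alt (s : String) (t : String) : Int × List String :=
  let L : Int := (s.toList.length : Int)
  let counts := PySem.Dict.counter
    ((PySem.List.pyRange 0 ((t.toList.length : Int) - L + 1) 1).map
      (fun i => String.ofList (PySem.List.slice t.toList (some i) (some (i + L)))))
  let valid := counts.items.foldl
      (fun acc p => if p.2 > 1 ∧ oneMutation s p.1 = true then acc ++ [p.1] else acc)
      ([] : List String)
  let sortedValid := PySem.List.sorted valid (fun x => x) false
  ((sortedValid.length : Int), sortedValid)

-- ===== PRECONDITION & SPEC =====
def Spec_house_divided (s : String) (t : String) (out : Int × List String) : Prop := out = house_divided_alt s t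
instance (s : String) (t : String) (out : Int × List String) : Decidable (Spec_house_divided s t out) := by unfold Spec_house_divided; infer_instance

-- ===== CLAIM (what is proved, stated in full; the proofs are below) =====
def Claim_equal_house_divided : Prop := ∀ (s : String) (t : String), Dom_house_divided s t → Spec_house_divided s t (house_divided s t)

-- ===== LEMMAS AND PROOFS =====

-- membership in a fold of Set.add over a list
theorem mem_foldl_setAdd {α β : Type} [BEq α] [LawfulBEq α] (l : List β) (g : β → α)
    (init : List α) (x : α) :
    x ∈ l.foldl (fun m c => PySem.Set.add m (g c)) init ↔ x ∈ init ∨ ∃ c ∈ l, x = g c := by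
  induction l generalizing init with
  | nil => simp
  | cons c l ih =>
    simp only [List.foldl_cons, ih, PySem.Set.mem_add, List.mem_cons]
    constructor
    · rintro ((h | h) | ⟨c', hc', h⟩)
      · exact Or.inl h
      · exact Or.inr ⟨c, Or.inl rfl, h⟩
      · exact Or.inr ⟨c', Or.inr hc', h⟩
    · rintro (h | ⟨c', (rfl | hc'), h⟩)
      · exact Or.inl (Or.inl h)
      · exact Or.inl (Or.inr h)
      · exact Or.inr ⟨c', hc', h⟩

-- membership in a doubly nested fold of Set.add
theorem mem_foldl_setAdd2 {α β γ : Type} [BEq α] [LawfulBEq α] (l : List γ) (F : γ → List β)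
    (g : γ → β → α) (init : List α) (x : α) :
    x ∈ l.foldl (fun m i => (F i).foldl (fun m c => PySem.Set.add m (g i c)) m) init ↔
      x ∈ init ∨ ∃ i ∈ l, ∃ c ∈ F i, x = g i c := by
  induction l generalizing init with
  | nil => simp
  | cons i l ih =>
    simp only [List.foldl_cons, ih, mem_foldl_setAdd, List.mem_cons]
    constructor
    · rintro ((h | h) | ⟨i', hi', h⟩)
      · exact Or.inl h
      · exact Or.inr ⟨i, Or.inl rfl, h⟩
      · exact Or.inr ⟨i', Or.inr hi', h⟩
    · rintro (h | ⟨i', (rfl | hi'), h⟩)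
      · exact Or.inl (Or.inl h)
      · exact Or.inl (Or.inr h)
      · exact Or.inr ⟨i', hi', h⟩

theorem nodup_foldl_setAdd {α β : Type} [BEq α] [LawfulBEq α] (l : List β) (g : β → α)
    (init : List α) (h : init.Nodup) :
    (l.foldl (fun m c => PySem.Set.add m (g c)) init).Nodup := by
  induction l generalizing init with
  | nil => exact h
  | cons c l ih => exact ih _ (PySem.Set.nodup_add _ _ h)

theorem nodup_foldl_setAdd2 {α β γ : Type} [BEq α] [LawfulBEq α] (l : List γ) (F : γ → List β)
    (g : γ → β → α) (init : List α) (h : init.Nodup) :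
    (l.foldl (fun m i => (F i).foldl (fun m c => PySem.Set.add m (g i c)) m) init).Nodup := by
  induction l generalizing init with
  | nil => exact h
  | cons i l ih => exact ih _ (nodup_foldl_setAdd _ _ _ h)

-- a filter whose predicate holds exactly at one member k picks out [k]
theorem filter_eq_singleton {α : Type} [DecidableEq α] (l : List α) (p : α → Bool) (k : α)
    (hnd : l.Nodup) (hk : k ∈ l) (hiff : ∀ j ∈ l, p j = true ↔ j = k) :
    l.filter p = [k] := by
  induction l with
  | nil => cases hk
  | cons a l ih =>
    rcases List.nodup_cons.mp hnd with ⟨ha, hnd'⟩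
    by_cases hak : a = k
    · subst hak
      have hpa : p a = true := (hiff a List.mem_cons_self).mpr rfl
      have hrest : l.filter p = [] := by
        apply List.filter_eq_nil_iff.mpr
        intro j hj hpj
        exact ha (((hiff j (List.mem_cons_of_mem _ hj)).mp hpj) ▸ hj)
      simp [hpa, hrest]
    · have hk' : k ∈ l := by
        rcases List.mem_cons.mp hk with h | h
        · exact absurd h.symm hak
        · exact h
      have hpa : ¬ p a = true := fun hpa => hak ((hiff a List.mem_cons_self).mp hpa)
      have := ih hnd' hk' (fun j hj => hiff j (List.mem_cons_of_mem _ hj))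
      simp [hpa, this]

-- a list agreeing with sl everywhere except at k, where it holds c, is sl.set k c
theorem eq_set_of_getD (sl ml : List Char) (k : Nat) (c : Char)
    (_hk : k < sl.length) (hlen : ml.length = sl.length)
    (hc : ml.getD k ' ' = c)
    (hj : ∀ j < sl.length, j ≠ k → sl.getD j ' ' = ml.getD j ' ') :
    ml = sl.set k c := by
  apply List.ext_getElem
  · simp [hlen]
  · intro j hj1 hj2
    have hjL : j < sl.length := by simpa [hlen] using hj1
    rw [List.getElem_set]
    by_cases hjk : k = j
    · subst hjk
      rw [List.getD_eq_getElem ml ' ' (by omega)] at hc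
      simp [hc]
    · have := hj j hjL (fun h => hjk h.symm)
      rw [List.getD_eq_getElem sl ' ' hjL, List.getD_eq_getElem ml ' ' (by omega)] at this
      simp [hjk, this.symm]

-- characterisation of the mutation set built by port A's nested fold
theorem mem_muts_iff (sl : List Char) (m : String) :
    m ∈ (PySem.List.pyRange 0 (sl.length : Int) 1).foldl
      (fun muts i =>
        (PySem.Set.diff (PySem.Set.ofList (['A','T','C','G'] : List Char))
            [PySem.List.pyGetD sl i ' ']).foldl
          (fun muts c =>
            PySem.Set.add muts
              (String.ofList (PySem.List.slice sl none (some i) ++ [c] ++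
                              PySem.List.slice sl (some (i + 1)) none)))
          muts)
      PySem.Set.empty ↔
    ∃ k < sl.length, ∃ c ∈ (['A','T','C','G'] : List Char),
      c ≠ sl.getD k ' ' ∧ m.toList = sl.set k c := by
  rw [mem_foldl_setAdd2]
  simp only [PySem.Set.empty, List.not_mem_nil, false_or, PySem.List.pyRange_zero_natCast,
    List.mem_map, PySem.Set.mem_diff, PySem.Set.mem_ofList, List.mem_singleton]
  constructor
  · rintro ⟨i, ⟨k, hk, rfl⟩, c, ⟨hcnuc, hcne⟩, hm⟩
    have hkL : k < sl.length := List.mem_range.mp hk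
    refine ⟨k, hkL, c, hcnuc, ?_, ?_⟩
    · rwa [PySem.List.pyGetD_natCast] at hcne
    · rw [hm, String.toList_ofList, PySem.List.slice_to_natCast]
      have : ((k : Int) + 1) = ((k + 1 : Nat) : Int) := by push_cast; ring
      rw [this, PySem.List.slice_from_natCast,
        List.set_eq_take_append_cons_drop, if_pos hkL]
      simp
  · rintro ⟨k, hkL, c, hcnuc, hcne, hm⟩
    refine ⟨(k : Int), ⟨k, List.mem_range.mpr hkL, rfl⟩, c,
      ⟨hcnuc, by rwa [PySem.List.pyGetD_natCast]⟩, ?_⟩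
    apply String.ext
    rw [hm, String.toList_ofList, PySem.List.slice_to_natCast]
    have : ((k : Int) + 1) = ((k + 1 : Nat) : Int) := by push_cast; ring
    rw [this, PySem.List.slice_from_natCast,
      List.set_eq_take_append_cons_drop, if_pos hkL]
    simp

-- characterisation of port B's one-substitution test, for a window of s's length
theorem oneMutation_iff (s m : String) (hlen : m.toList.length = s.toList.length) :
    oneMutation s m = true ↔
    ∃ k < s.toList.length, ∃ c ∈ (['A','T','C','G'] : List Char),
      c ≠ s.toList.getD k ' ' ∧ m.toList = s.toList.set k c := by
  unfold oneMutation
  set sl := s.toList with hsl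
  set ml := m.toList with hml
  set L := sl.length with hL
  have hpred : ((fun j : Int => PySem.List.pyGetD sl j ' ' != PySem.List.pyGetD ml j ' ') ∘
      (fun k : Nat => (k : Int))) = (fun k : Nat => sl.getD k ' ' != ml.getD k ' ') := by
    funext k
    simp [Function.comp, PySem.List.pyGetD_natCast]
  rw [PySem.List.pyRange_zero_natCast,
    List.filter_map (f := fun k : Nat => ((k : Int))), hpred]
  simp only [Bool.and_eq_true, beq_iff_eq, List.length_map]
  constructor
  · rintro ⟨h1, h2⟩
    rcases List.length_eq_one_iff.mp h1 with ⟨k, hk⟩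
    have hkmem : k ∈ (List.range L).filter (fun k => sl.getD k ' ' != ml.getD k ' ') := by
      rw [hk]; exact List.mem_singleton.mpr rfl
    rcases List.mem_filter.mp hkmem with ⟨hkr, hpk⟩
    have hkL : k < L := List.mem_range.mp hkr
    have hne : sl.getD k ' ' ≠ ml.getD k ' ' := by simpa using hpk
    rw [hk] at h2
    simp only [List.map_cons, List.map_nil, PySem.List.pyGetD_zero, List.getD_cons_zero,
      PySem.List.pyGetD_natCast] at h2
    have hc : ml.getD k ' ' ∈ (['A','T','C','G'] : List Char) := by
      have := (PySem.Set.contains_iff _ _).mp h2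
      rwa [PySem.Set.mem_ofList] at this
    refine ⟨k, hkL, ml.getD k ' ', hc, Ne.symm hne, ?_⟩
    apply eq_set_of_getD sl ml k _ hkL hlen rfl
    intro j hjL hjk
    by_contra hne2
    have hjmem : j ∈ (List.range L).filter (fun k => sl.getD k ' ' != ml.getD k ' ') :=
      List.mem_filter.mpr ⟨List.mem_range.mpr hjL, by simpa using hne2⟩
    rw [hk] at hjmem
    exact hjk (List.mem_singleton.mp hjmem)
  · rintro ⟨k, hkL, c, hcnuc, hcne, hm⟩
    have hget : ∀ j, j < L → ml.getD j ' ' = if k = j then c else sl.getD j ' ' := by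
      intro j hjL
      rw [hm, List.getD_eq_getElem _ ' ' (by simp; omega), List.getElem_set]
      split_ifs with h
      · rfl
      · exact (List.getD_eq_getElem sl ' ' hjL).symm
    have hfilt : (List.range L).filter (fun j => sl.getD j ' ' != ml.getD j ' ') = [k] := by
      apply filter_eq_singleton _ _ _ List.nodup_range (List.mem_range.mpr hkL)
      intro j hj
      have hjL := List.mem_range.mp hj
      rw [hget j hjL]
      constructor
      · intro hb
        by_contra hjk
        have hkj : ¬ k = j := fun h => hjk (Eq.symm h)
        simp [hkj] at hb
      · rintro rfl
        have hne2 := Ne.symm hcne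
        simp only [bne_iff_ne, ne_eq]
        exact hne2
    rw [hfilt]
    refine ⟨rfl, ?_⟩
    simp only [List.map_cons, List.map_nil, PySem.List.pyGetD_zero, List.getD_cons_zero,
      PySem.List.pyGetD_natCast]
    rw [hget k hkL, if_pos rfl]
    rw [PySem.Set.contains_iff, PySem.Set.mem_ofList]
    exact hcnuc

-- every window taken by both ports has s's length
theorem length_window (tl : List Char) (L : Nat) (i : Int)
    (h0 : 0 ≤ i) (h1 : i < (tl.length : Int) - (L : Int) + 1) :
    (PySem.List.slice tl (some i) (some (i + (L : Int)))).length = L := by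
  have hiL : i + (L : Int) ≤ (tl.length : Int) := by omega
  rw [PySem.List.slice_of_nonneg tl h0 (by omega) (by omega) hiL]
  simp
  omega

-- ===== VERDICT (by name: the statement is the Claim_ definition above) =====
theorem house_divided_spec : Claim_equal_house_divided := by
  intro s t _
  show house_divided s t = house_divided_alt s t
  unfold house_divided house_divided_alt
  dsimp only
  set sl := s.toList with hsl
  set tl := t.toList with htl
  set subs : List String := (PySem.List.pyRange 0 ((tl.length : Int) - (sl.length : Int) + 1) 1).map
      (fun i => String.ofList (PySem.List.slice tl (some i) (some (i + (sl.length : Int))))) with hsubs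
  set muts := (PySem.List.pyRange 0 (sl.length : Int) 1).foldl
      (fun muts i =>
        (PySem.Set.diff (PySem.Set.ofList (['A','T','C','G'] : List Char))
            [PySem.List.pyGetD sl i ' ']).foldl
          (fun muts c =>
            PySem.Set.add muts
              (String.ofList (PySem.List.slice sl none (some i) ++ [c] ++
                              PySem.List.slice sl (some (i + 1)) none)))
          muts)
      PySem.Set.empty with hmuts
  have hlenmem : ∀ m ∈ subs, m.toList.length = sl.length := by
    intro m hm
    rcases List.mem_map.mp hm with ⟨i, hi, rfl⟩
    rcases PySem.List.mem_pyRange_one.mp hi with ⟨h0, h1⟩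
    rw [String.toList_ofList]
    exact length_window tl sl.length i h0 h1
  have hperm : (muts.foldl
      (fun acc mu => if (PySem.Dict.counter subs).getD mu 0 > 1 then acc ++ [mu] else acc)
      ([] : List String)).Perm
      ((PySem.Dict.counter subs).items.foldl
      (fun acc p => if p.2 > 1 ∧ oneMutation s p.1 = true then acc ++ [p.1] else acc)
      ([] : List String)) := by
    rw [PySem.List.foldl_append_ite_eq_filter
      (fun mu => (PySem.Dict.counter subs).getD mu 0 > 1), List.nil_append]
    rw [PySem.List.foldl_append_ite (fun p => p.2 > 1 ∧ oneMutation s p.1 = true) Prod.fst,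
      List.nil_append, PySem.Dict.items_counter, List.filter_map, List.map_map]
    have hnd1 : (muts.filter (fun mu => decide ((PySem.Dict.counter subs).getD mu 0 > 1))).Nodup := by
      apply List.Nodup.filter
      rw [hmuts]
      exact nodup_foldl_setAdd2 _ _ _ _ List.nodup_nil
    have hnd2 : (((PySem.Set.ofList subs).filter
        ((fun p => decide (p.2 > 1 ∧ oneMutation s p.1 = true)) ∘
          (fun k => (k, (List.count k subs : Int))))).map
        (Prod.fst ∘ fun k => (k, (List.count k subs : Int)))).Nodup := by
      apply List.Nodup.map
      · intro a b hab
        simpa using hab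
      · exact List.Nodup.filter _ (PySem.Set.nodup_ofList subs)
    rw [List.perm_ext_iff_of_nodup hnd1 hnd2]
    intro m
    rw [List.mem_filter, List.mem_map]
    constructor
    · rintro ⟨hmm, hcnt⟩
      rw [decide_eq_true_iff, PySem.Dict.getD_counter] at hcnt
      have hmem : m ∈ subs := List.count_pos_iff.mp (by exact_mod_cast (by omega : (0:Int) < (List.count m subs : Int)))
      have hlen : m.toList.length = sl.length := hlenmem m hmem
      have hone : oneMutation s m = true :=
        (oneMutation_iff s m hlen).mpr ((mem_muts_iff sl m).mp (hmuts ▸ hmm))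
      refine ⟨m, ?_, rfl⟩
      rw [List.mem_filter]
      refine ⟨(PySem.Set.mem_ofList subs m).mpr hmem, ?_⟩
      simp only [Function.comp, decide_eq_true_iff]
      exact ⟨hcnt, hone⟩
    · rintro ⟨m', hm', rfl⟩
      rcases List.mem_filter.mp hm' with ⟨hmem, hcond⟩
      simp only [Function.comp, decide_eq_true_iff] at hcond
      rcases hcond with ⟨hcnt, hone⟩
      have hmemsub : m' ∈ subs := (PySem.Set.mem_ofList subs m').mp hmem
      have hlen : m'.toList.length = sl.length := hlenmem m' hmemsub
      refine ⟨?_, ?_⟩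
      · rw [hmuts]
        exact (mem_muts_iff sl m').mpr ((oneMutation_iff s m' hlen).mp hone)
      · rw [decide_eq_true_iff, PySem.Dict.getD_counter]
        exact hcnt
  have hsorted := PySem.List.sorted_eq_sorted_of_perm _ _ (fun x : String => x)
    (fun a b h => h) hperm
  simp only [hsorted]
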